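-- pv_equiv track=rewrite | github.com/ly-kim-phuoc/my_bot | GUI for map editting/goal.py | calculate_goal
-- ===== SOURCE A (Python) =====
-- def calculate_goal(cells):
--   goals = []
--   goals.append(cells[0][0])
--   previous_cell = None
--   for cell in cells[0]:
--     if cell[0] != previous_cell[0] if previous_cell else False:
--       goals.append(previous_cell)
--       goals.append(cell)
--     previous_cell = cell
--   goals.append(cells[0][-1])
--   return goals
-- ===== SOURCE B (Python) =====
-- def _runs(row):
--     # split row into maximal runs of consecutive cells sharing the same first coordinate
--     if not row:
--         return []
--     head, rest = row[0], row[1:]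
--     i = 0
--     while i < len(rest) and rest[i][0] == head[0]:
--         i += 1
--     return [[head] + rest[:i]] + _runs(rest[i:])
--
-- def calculate_goal(cells):
--     row = cells[0]
--     runs = _runs(row)
--     goals = [row[0]]
--     for r1, r2 in zip(runs, runs[1:]):
--         goals.append(r1[-1])
--         goals.append(r2[0])
--     goals.append(row[-1])
--     return goals
-- ===== Notes on version B (the rewrite author's own statement) =====
-- stated objective: alternative
-- what changed: Replaces A's previous-cell-pointer scan with a runs-then-boundaries decomposition: the first row is first split into maximal runs of equal x-coordinate, then boundary pairs are emitted from adjacent runs (last of the earlier run, first of the later run).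
import Mathlib
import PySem

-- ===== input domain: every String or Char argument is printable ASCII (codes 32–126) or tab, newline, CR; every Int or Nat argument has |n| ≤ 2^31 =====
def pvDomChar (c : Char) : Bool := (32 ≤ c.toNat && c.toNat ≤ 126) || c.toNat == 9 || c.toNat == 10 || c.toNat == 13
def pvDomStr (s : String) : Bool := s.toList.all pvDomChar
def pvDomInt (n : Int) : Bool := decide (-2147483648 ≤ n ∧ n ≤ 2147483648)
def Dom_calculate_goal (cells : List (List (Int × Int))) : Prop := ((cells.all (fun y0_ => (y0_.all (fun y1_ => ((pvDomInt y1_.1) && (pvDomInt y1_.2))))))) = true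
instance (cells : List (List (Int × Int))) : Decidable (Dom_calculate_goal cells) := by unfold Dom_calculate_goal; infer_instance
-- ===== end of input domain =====

-- B replaces A's previous-cell pointer scan by a runs-then-boundaries decomposition (alternative, same cost); equivalence of return values proved on nonempty first rows.

-- ===== PORT A =====
-- one step of A's loop: state = (goals so far, previous_cell)
def cgStep (s : List (Int × Int) × Option (Int × Int)) (c : Int × Int) :
    List (Int × Int) × Option (Int × Int) :=
  match s.2 with
  | some p => if c.1 ≠ p.1 then (s.1 ++ [p, c], some c) else (s.1, some c)
  | none => (s.1, some c)

def calculate_goal (cells : List (List (Int × Int))) : List (Int × Int) :=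
  let row := cells.headD []          -- cells[0]; Pre_ excludes the IndexError cases
  let init : List (Int × Int) := [row.headD (0, 0)]   -- goals.append(cells[0][0])
  let res := row.foldl cgStep (init, none)
  res.1 ++ [row.getLast?.getD (0, 0)]                 -- goals.append(cells[0][-1])

-- ===== PORT B =====
-- _runs: split into maximal runs of consecutive cells with equal first coordinate
def runsOf : List (Int × Int) → List (List (Int × Int))
  | [] => []
  | c :: rest =>
      (c :: rest.takeWhile (fun x => x.1 == c.1)) :: runsOf (rest.dropWhile (fun x => x.1 == c.1))
termination_by l => l.length
decreasing_by
  simp only [List.length_cons]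
  exact Nat.lt_succ_of_le (List.length_dropWhile_le _ _)

def calculate_goal_alt (cells : List (List (Int × Int))) : List (Int × Int) :=
  let row := cells.headD []          -- cells[0]; Pre_ excludes the IndexError cases
  let runs := runsOf row
  let goals : List (Int × Int) := [row.headD (0, 0)]
  let goals := (runs.zip (runs.drop 1)).foldl
      (fun g p => g ++ [p.1.getLast?.getD (0, 0), p.2.headD (0, 0)]) goals
  goals ++ [row.getLast?.getD (0, 0)]

-- ===== PRECONDITION & SPEC =====
-- Pre_ excludes exactly the inputs where Python A raises IndexError: empty cells, or empty first row.
def Pre_calculate_goal (cells : List (List (Int × Int))) : Prop :=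
  cells ≠ [] ∧ cells.headD [] ≠ []
instance (cells : List (List (Int × Int))) : Decidable (Pre_calculate_goal cells) := by
  unfold Pre_calculate_goal; infer_instance

def pvWitness_calculate_goal : (List (List (Int × Int))) := [[(0, 0), (1, 0)]]

def Spec_calculate_goal (cells : List (List (Int × Int))) (out : List (Int × Int)) : Prop := out = calculate_goal_alt cells
instance (cells : List (List (Int × Int))) (out : List (Int × Int)) : Decidable (Spec_calculate_goal cells out) := by unfold Spec_calculate_goal; infer_instance

-- ===== CLAIM (what is proved, stated in full; the proofs are below) =====
def Claim_equal_calculate_goal : Prop := ∀ (cells : List (List (Int × Int))), Dom_calculate_goal cells → Pre_calculate_goal cells → Spec_calculate_goal cells (calculate_goal cells)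

-- ===== LEMMAS AND PROOFS =====

-- the boundary pairs A's scan emits, as a function of the previous cell and the rest of the row
def bnd : Option (Int × Int) → List (Int × Int) → List (Int × Int)
  | _, [] => []
  | none, c :: rest => bnd (some c) rest
  | some p, c :: rest => (if c.1 ≠ p.1 then [p, c] else []) ++ bnd (some c) rest

-- the boundary pairs B emits from a list of runs
def zb : List (List (Int × Int)) → List (Int × Int)
  | r1 :: r2 :: rs => [r1.getLast?.getD (0, 0), r2.headD (0, 0)] ++ zb (r2 :: rs)
  | _ => []

theorem foldA (l : List (Int × Int)) :
    ∀ (g : List (Int × Int)) (prev : Option (Int × Int)),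
      (l.foldl cgStep (g, prev)).1 = g ++ bnd prev l := by
  induction l with
  | nil => intro g prev; simp [bnd]
  | cons c rest ih =>
      intro g prev
      cases prev with
      | none => simp [cgStep, bnd, ih]
      | some p =>
          by_cases h : c.1 = p.1
          · simp [cgStep, bnd, h, ih]
          · simp [cgStep, bnd, h, ih]

theorem foldB (rs : List (List (Int × Int))) :
    ∀ (g : List (Int × Int)),
      (rs.zip (rs.drop 1)).foldl
        (fun g p => g ++ [p.1.getLast?.getD (0, 0), p.2.headD (0, 0)]) g = g ++ zb rs := by
  induction rs with
  | nil => intro g; simp [zb]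
  | cons r1 rest ih =>
      intro g
      cases rest with
      | nil => simp [zb]
      | cons r2 t =>
          show List.foldl _ _ ((r1, r2) :: ((r2 :: t).zip ((r2 :: t).drop 1))) = _
          rw [List.foldl_cons, ih]
          simp [zb, List.append_assoc]

theorem zb_cons_cons (p c : Int × Int) (t : List (Int × Int))
    (rs : List (List (Int × Int))) :
    zb ((p :: c :: t) :: rs) = zb ((c :: t) :: rs) := by
  cases rs with
  | nil => simp [zb]
  | cons r rs' => simp [zb, List.getLast?_cons_cons]

theorem key (l : List (Int × Int)) : ∀ (p : Int × Int),
    bnd (some p) l =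
      zb ((p :: l.takeWhile (fun x => x.1 == p.1)) ::
          runsOf (l.dropWhile (fun x => x.1 == p.1))) := by
  induction l with
  | nil => intro p; simp [bnd, zb, runsOf]
  | cons c rest ih =>
      intro p
      by_cases h : c.1 = p.1
      · have hfun : (fun x : Int × Int => x.1 == p.1) = (fun x => x.1 == c.1) := by
          funext x; rw [h]
        simp only [bnd, ne_eq, not_true_eq_false, if_false, List.nil_append,
          List.takeWhile_cons, List.dropWhile_cons, h, beq_self_eq_true, if_true, hfun]
        rw [ih c, zb_cons_cons]
      · have hb : (c.1 == p.1) = false := by simp [h]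
        simp only [bnd, h, ne_eq, not_false_eq_true, if_true,
          List.takeWhile_cons, List.dropWhile_cons, hb]
        rw [ih c]
        cases hr : rest.takeWhile (fun x => x.1 == c.1) <;>
          simp [zb, runsOf, List.cons_append] <;> rw [hr]

theorem bnd_runs (row : List (Int × Int)) : bnd none row = zb (runsOf row) := by
  cases row with
  | nil => simp [bnd, zb, runsOf]
  | cons c rest =>
      show bnd (some c) rest = _
      rw [key, runsOf]

-- ===== VERDICT (by name: the statement is the Claim_ definition above) =====
theorem calculate_goal_spec : Claim_equal_calculate_goal := by
  intro cells _ _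
  unfold Spec_calculate_goal calculate_goal calculate_goal_alt
  simp only [foldA, foldB, bnd_runs, List.append_assoc]
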